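-- pv_equiv track=rewrite | github.com/naro-Kim/CodingTestPractice | 프로그래머스/lv2/42626. 더 맵게/더 맵게.py | solution
-- ===== SOURCE A (Python) =====
-- import heapq as hq
--
-- def solution(scoville, K):
--     cnt = 0
--     hq.heapify(scoville)
--     while 1:
--         try:
--             f = hq.heappop(scoville)
--             if f >= K:
--                 break
--             s = hq.heappop(scoville)
--             hq.heappush(scoville, f + s*2)
--             cnt += 1
--         except:
--             return -1
--     return cnt
-- ===== SOURCE B (Python) =====
-- def solution(scoville, K):
--     # Sorted-list strategy instead of a binary heap: sort once, read the two smallest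
--     # at a moving head index, and re-insert each mix at its ordered position found by
--     # a hand-written binary search.  (A mutates `scoville` in place via heapify; B
--     # leaves it untouched — equivalence is about the return value.)
--     cnt = 0
--     xs = sorted(scoville)
--     i = 0                       # xs[i:] is the live sorted pool
--     while True:
--         if i >= len(xs):
--             return -1
--         if xs[i] >= K:
--             return cnt
--         if len(xs) - i < 2:
--             return -1
--         new = xs[i] + 2 * xs[i + 1]
--         i += 2
--         lo, hi = i, len(xs)     # binary search: first position in xs[i:] with xs[pos] > new
--         while lo < hi:
--             mid = (lo + hi) // 2
--             if xs[mid] <= new: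
--                 lo = mid + 1
--             else:
--                 hi = mid
--         xs.insert(lo, new)
--         cnt += 1
-- ===== Notes on version B (the rewrite author's own statement) =====
-- stated objective: alternative
-- what changed: Replaces the binary heap (heapify/heappop/heappush with a bare except) by a sort-once sorted list with a moving head index: the two smallest are read at the head, the mix is re-inserted at the position found by a hand-written binary search, and emptiness is checked explicitly instead of via exception handling.
import Mathlib
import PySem

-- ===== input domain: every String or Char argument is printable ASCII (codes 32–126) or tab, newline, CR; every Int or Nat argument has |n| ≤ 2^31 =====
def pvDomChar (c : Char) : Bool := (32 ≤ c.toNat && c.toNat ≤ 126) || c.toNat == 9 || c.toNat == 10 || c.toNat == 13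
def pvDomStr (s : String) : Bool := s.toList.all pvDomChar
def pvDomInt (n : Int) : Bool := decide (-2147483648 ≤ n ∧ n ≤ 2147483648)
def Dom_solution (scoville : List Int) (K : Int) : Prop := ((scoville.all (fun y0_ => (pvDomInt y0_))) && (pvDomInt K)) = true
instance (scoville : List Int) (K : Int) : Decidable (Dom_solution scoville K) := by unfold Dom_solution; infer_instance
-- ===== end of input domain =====

-- B replaces A's binary heap (heapify/heappop/heappush guarded by a bare except) with a
-- sort-once sorted list read at a moving head index, re-inserting each mix at the position
-- found by a hand-written binary search, with explicit emptiness checks. A mutates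
-- `scoville` in place (heapify); the equivalence proved here is about the return value only.


-- ===== PORT A =====
-- A's heap operations are library calls (heapq). For Int elements only the popped VALUES
-- are observable in A, and heappop returns exactly the minimum value of the heap's
-- multiset; so the heap state is ported as the plain multiset (a list) and heappop as
-- "first minimal value + remove its first occurrence" — exact for A's return value.
def heappopA (h : List Int) : Option (Int × List Int) :=
  match PySem.List.min? h (fun x => x) with
  | none => none          -- heappop on an empty heap: IndexError, caught by A's bare except
  | some m =>
    match PySem.List.remove? h m with
    | none => none        -- unreachable: m ∈ h
    | some h' => some (m, h')

-- A's `while 1` loop; fuel = initial length + 1 bounds the iterations (each mix shrinks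
-- the pool by one element).
def loopA (K : Int) : Nat → List Int → Int → Int
  | 0, _, _ => -1
  | fuel+1, h, cnt =>
    match heappopA h with
    | none => -1                     -- except: return -1
    | some (f, h1) =>
      if f ≥ K then cnt              -- break; return cnt
      else
        match heappopA h1 with
        | none => -1                 -- except: return -1
        | some (s, h2) => loopA K fuel (h2 ++ [f + s * 2]) (cnt + 1)

def solution (scoville : List Int) (K : Int) : Int :=
  loopA K (scoville.length + 1) scoville 0

-- ===== PORT B =====
-- Source B's hand-written binary-search loop (mid inlined); every xs[j] it reads is in range,
-- so the read is ported as getD with an irrelevant default.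
def bisectLoop (xs : List Int) (new : Int) (lo hi : Nat) : Nat :=
  if _h : lo < hi then
    if xs.getD ((lo + hi) / 2) 0 ≤ new then bisectLoop xs new ((lo + hi) / 2 + 1) hi
    else bisectLoop xs new lo ((lo + hi) / 2)
  else lo
termination_by hi - lo
decreasing_by all_goals omega

-- Source B's `while True` loop over (xs, i); same fuel bound as A's loop (the live pool
-- xs[i:] shrinks by one element per mix). xs.insert(lo, new) with lo ≤ len(xs) is
-- List.insertIdx lo new.
def loopB (K : Int) : Nat → List Int → Nat → Int → Int
  | 0, _, _, _ => -1
  | fuel+1, xs, i, cnt =>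
    if xs.length ≤ i then -1
    else if xs.getD i 0 ≥ K then cnt
    else if xs.length - i < 2 then -1
    else
      loopB K fuel
        (xs.insertIdx (bisectLoop xs (xs.getD i 0 + 2 * xs.getD (i+1) 0) (i+2) xs.length)
          (xs.getD i 0 + 2 * xs.getD (i+1) 0))
        (i+2) (cnt + 1)

def solution_alt (scoville : List Int) (K : Int) : Int :=
  loopB K (scoville.length + 1) (PySem.List.sorted scoville (fun x => x) false) 0 0

-- ===== PRECONDITION & SPEC =====
def Spec_solution (scoville : List Int) (K : Int) (out : Int) : Prop := out = solution_alt scoville K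
instance (scoville : List Int) (K : Int) (out : Int) : Decidable (Spec_solution scoville K out) := by unfold Spec_solution; infer_instance

-- ===== CLAIM (what is proved, stated in full; the proofs are below) =====
def Claim_equal_solution : Prop := ∀ (scoville : List Int) (K : Int), Dom_solution scoville K → Spec_solution scoville K (solution scoville K)

-- ===== LEMMAS AND PROOFS =====

-- Abstract sorted-pool loop: the common ground between the two ports. B's (xs, i) state
-- projects onto it via `xs.drop i`; A's multiset pool matches it up to permutation.
def insertOrdered (v : Int) : List Int → List Int
  | [] => [v]
  | x :: t => if x ≤ v then x :: insertOrdered v t else v :: x :: t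

def loopS (K : Int) : Nat → List Int → Int → Int
  | 0, _, _ => -1
  | fuel+1, ys, cnt =>
    match ys with
    | [] => -1
    | [y] => if y ≥ K then cnt else -1
    | y1 :: y2 :: t =>
      if y1 ≥ K then cnt
      else loopS K fuel (insertOrdered (y1 + 2 * y2) t) (cnt + 1)

lemma loopS_one (K : Int) (fuel : Nat) (y : Int) (cnt : Int) :
    loopS K (fuel+1) [y] cnt = if y ≥ K then cnt else -1 := rfl

lemma loopS_two (K : Int) (fuel : Nat) (y1 y2 : Int) (t : List Int) (cnt : Int) :
    loopS K (fuel+1) (y1 :: y2 :: t) cnt =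
      if y1 ≥ K then cnt else loopS K fuel (insertOrdered (y1 + 2 * y2) t) (cnt + 1) := rfl

lemma insertOrdered_perm (v : Int) (ys : List Int) :
    (insertOrdered v ys).Perm (v :: ys) := by
  induction ys with
  | nil => simp [insertOrdered]
  | cons x t ih =>
    simp only [insertOrdered]
    split
    · exact (ih.cons x).trans (List.Perm.swap v x t)
    · exact List.Perm.refl _

lemma insertOrdered_pairwise (v : Int) (ys : List Int)
    (h : ys.Pairwise (· ≤ ·)) : (insertOrdered v ys).Pairwise (· ≤ ·) := by
  induction ys with
  | nil => simp [insertOrdered]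
  | cons x t ih =>
    rw [List.pairwise_cons] at h
    simp only [insertOrdered]
    split
    · rename_i hxv
      refine List.pairwise_cons.2 ⟨?_, ih h.2⟩
      intro b hb
      rcases List.mem_cons.1 (((insertOrdered_perm v t).mem_iff).1 hb) with rfl | hbt
      · exact hxv
      · exact h.1 b hbt
    · rename_i hxv
      refine List.pairwise_cons.2 ⟨?_, List.pairwise_cons.2 ⟨h.1, h.2⟩⟩
      intro b hb
      rcases List.mem_cons.1 hb with rfl | hbt
      · omega
      · exact le_trans (by omega) (h.1 b hbt)

-- heappop on a pool that is a permutation of the sorted list y :: t returns y and a pool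
-- that is a permutation of t; on an empty pool it returns none.
lemma heappopA_nil : heappopA [] = none := by
  simp [heappopA, PySem.List.min?]

lemma heappopA_of_perm (xs : List Int) (y : Int) (t : List Int)
    (hp : (y :: t).Perm xs) (hs : (y :: t).Pairwise (· ≤ ·)) :
    ∃ xs', heappopA xs = some (y, xs') ∧ t.Perm xs' := by
  have hne : xs ≠ [] := by
    intro h; subst h; exact (List.not_mem_nil (a := y)) (hp.mem_iff.1 List.mem_cons_self)
  obtain ⟨m, hm⟩ : ∃ m, PySem.List.min? xs (fun x => x) = some m := by
    cases hmin : PySem.List.min? xs (fun x => x) with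
    | none => exact absurd ((PySem.List.min?_eq_none_iff xs (fun x => x)).1 hmin) hne
    | some m => exact ⟨m, rfl⟩
  have hmmem : m ∈ xs := PySem.List.min?_mem hm
  have hmmin : ∀ z ∈ xs, m ≤ z := PySem.List.min?_isMin hm
  have hymem : y ∈ xs := hp.mem_iff.1 List.mem_cons_self
  have hyle : ∀ z ∈ xs, y ≤ z := by
    intro z hz
    rcases List.mem_cons.1 (hp.mem_iff.2 hz) with h | h
    · exact le_of_eq h.symm
    · exact (List.pairwise_cons.1 hs).1 z h
  have hmy : m = y := le_antisymm (hmmin y hymem) (hyle m hmmem)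
  subst hmy
  have hrem : PySem.List.remove? xs m = some (xs.erase m) :=
    PySem.List.remove?_eq_some_erase xs m hmmem
  refine ⟨xs.erase m, ?_, ?_⟩
  · simp [heappopA, hm, hrem]
  · have := hp.erase m
    simpa using this

-- A's loop equals the abstract sorted-pool loop.
lemma loopA_eq_loopS (K : Int) (fuel : Nat) :
    ∀ (xs ys : List Int) (cnt : Int), ys.Perm xs → ys.Pairwise (· ≤ ·) →
      loopA K fuel xs cnt = loopS K fuel ys cnt := by
  induction fuel with
  | zero => intro xs ys cnt _ _; rfl
  | succ fuel ih =>
    intro xs ys cnt hp hs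
    match ys with
    | [] =>
      have hxs : xs = [] := hp.nil_eq.symm
      subst hxs
      simp [loopA, loopS, heappopA_nil]
    | [y] =>
      obtain ⟨xs', hpop, hperm⟩ := heappopA_of_perm xs y [] hp hs
      have hxs' : xs' = [] := (hperm.nil_eq).symm
      subst hxs'
      simp only [loopA, loopS, hpop]
      split
      · rfl
      · simp [heappopA_nil]
    | y1 :: y2 :: t =>
      obtain ⟨xs1, hpop1, hperm1⟩ := heappopA_of_perm xs y1 (y2 :: t) hp hs
      have hs2 : (y2 :: t).Pairwise (· ≤ ·) := (List.pairwise_cons.1 hs).2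
      obtain ⟨xs2, hpop2, hperm2⟩ := heappopA_of_perm xs1 y2 t hperm1 hs2
      simp only [loopA, loopS, hpop1, hpop2]
      split
      · rfl
      · apply ih
        · have h1 : (insertOrdered (y1 + 2 * y2) t).Perm ((y1 + 2 * y2) :: t) :=
            insertOrdered_perm _ _
          have h2 : y1 + y2 * 2 = y1 + 2 * y2 := by ring
          rw [h2]
          exact h1.trans ((hperm2.cons _).trans (List.perm_append_singleton _ _).symm)
        · exact insertOrdered_pairwise _ _ ((List.pairwise_cons.1 hs2).2)

-- The binary-search loop: on a segment [lo, hi) that is sorted, it returns the first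
-- position whose element exceeds `new`.
lemma bisect_spec (xs : List Int) (new : Int) :
    ∀ (n lo hi : Nat), hi - lo ≤ n → lo ≤ hi → hi ≤ xs.length →
      (∀ p q, lo ≤ p → p ≤ q → q < hi → xs.getD p 0 ≤ xs.getD q 0) →
      lo ≤ bisectLoop xs new lo hi ∧ bisectLoop xs new lo hi ≤ hi ∧
      (∀ j, lo ≤ j → j < bisectLoop xs new lo hi → xs.getD j 0 ≤ new) ∧
      (∀ j, bisectLoop xs new lo hi ≤ j → j < hi → new < xs.getD j 0) := by
  intro n
  induction n with
  | zero =>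
    intro lo hi hn hlohi _ _
    have hge : ¬ lo < hi := by omega
    rw [bisectLoop]
    simp only [hge, dite_false]
    exact ⟨le_refl _, hlohi, fun j h1 h2 => absurd h2 (by omega),
           fun j h1 h2 => absurd h2 (by omega)⟩
  | succ n ih =>
    intro lo hi hn hlohi hhi hmono
    rw [bisectLoop]
    by_cases hlt : lo < hi
    · simp only [hlt, dite_true]
      have hmid1 : lo ≤ (lo + hi) / 2 := by omega
      have hmid2 : (lo + hi) / 2 < hi := by omega
      by_cases hcmp : xs.getD ((lo + hi) / 2) 0 ≤ new
      · simp only [hcmp, if_true]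
        obtain ⟨h1, h2, h3, h4⟩ := ih ((lo + hi) / 2 + 1) hi (by omega) (by omega) hhi
          (fun p q hp hpq hq => hmono p q (by omega) hpq hq)
        refine ⟨by omega, h2, ?_, h4⟩
        intro j hj1 hj2
        by_cases hjm : j < (lo + hi) / 2 + 1
        · exact le_trans (hmono j ((lo + hi) / 2) hj1 (by omega) hmid2) hcmp
        · exact h3 j (by omega) hj2
      · simp only [hcmp, if_false]
        obtain ⟨h1, h2, h3, h4⟩ := ih lo ((lo + hi) / 2) (by omega) (by omega) (by omega)
          (fun p q hp hpq hq => hmono p q hp hpq (by omega))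
        refine ⟨h1, by omega, h3, ?_⟩
        intro j hj1 hj2
        by_cases hjm : j < (lo + hi) / 2
        · exact h4 j hj1 hjm
        · exact lt_of_lt_of_le (lt_of_not_ge hcmp)
            (hmono ((lo + hi) / 2) j (by omega) (by omega) hj2)
    · simp only [hlt, dite_false]
      exact ⟨le_refl _, hlohi, fun j h1 h2 => absurd h2 (by omega),
             fun j h1 h2 => absurd h2 (by omega)⟩

-- inserting at position i + k commutes with dropping the first i elements
lemma drop_insertIdx_of_le (v : Int) :
    ∀ (i : Nat) (xs : List Int) (r : Nat), i ≤ r → r ≤ xs.length →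
      (xs.insertIdx r v).drop i = (xs.drop i).insertIdx (r - i) v := by
  intro i
  induction i with
  | zero => intro xs r _ _; simp
  | succ i ih =>
    intro xs r h1 h2
    match xs with
    | [] => simp at h2; omega
    | x :: t =>
      match r, h1 with
      | r+1, _ =>
        rw [List.insertIdx_succ_cons]
        simp only [List.drop_succ_cons]
        rw [ih t r (by omega) (by simpa using h2)]
        congr 1
        omega

-- a positional insert whose position splits ≤ new / > new is the ordered insert
lemma insertOrdered_eq_insertIdx (new : Int) :
    ∀ (ys : List Int) (k : Nat), k ≤ ys.length →
      (∀ j, j < k → ys.getD j 0 ≤ new) →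
      (∀ j, k ≤ j → j < ys.length → new < ys.getD j 0) →
      insertOrdered new ys = ys.insertIdx k new := by
  intro ys
  induction ys with
  | nil =>
    intro k hk _ _
    have hk0 : k = 0 := by simpa using hk
    subst hk0
    simp [insertOrdered]
  | cons y t ih =>
    intro k hk h1 h2
    match k with
    | 0 =>
      have : new < y := h2 0 (by omega) (by simp)
      simp only [insertOrdered, List.insertIdx_zero]
      rw [if_neg (by omega)]
    | k+1 =>
      have : y ≤ new := h1 0 (by omega)
      simp only [insertOrdered, List.insertIdx_succ_cons]
      rw [if_pos this]
      rw [ih k (by simpa using hk) (fun j hj => h1 (j+1) (by omega))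
        (fun j hj1 hj2 => h2 (j+1) (by omega) (by simpa using hj2))]

-- B's indexed loop equals the abstract sorted-pool loop on the live suffix xs[i:].
lemma loopB_eq_loopS (K : Int) (fuel : Nat) :
    ∀ (xs : List Int) (i : Nat) (cnt : Int), (xs.drop i).Pairwise (· ≤ ·) →
      loopB K fuel xs i cnt = loopS K fuel (xs.drop i) cnt := by
  induction fuel with
  | zero => intro xs i cnt _; rfl
  | succ fuel ih =>
    intro xs i cnt hp
    match hd : xs.drop i with
    | [] =>
      have hlen : xs.length ≤ i := List.drop_eq_nil_iff.1 hd
      simp [loopB, loopS, hlen]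
    | [y] =>
      have hlen2 : xs.length - i = 1 := by
        have h := congrArg List.length hd
        simpa using h
      have h0 : xs[i]? = some y := by
        have h := congrArg (fun (l : List Int) => l[0]?) hd
        simpa [List.getElem?_drop] using h
      have hgi : xs.getD i 0 = y := by simp [List.getD_eq_getElem?_getD, h0]
      simp only [loopB]
      rw [loopS_one, if_neg (by omega : ¬ xs.length ≤ i), hgi]
      split_ifs with hK h2
      · rfl
      · rfl
      · omega
    | y :: y2 :: t2 =>
      have hlen2 : xs.length - i = t2.length + 2 := by
        have h := congrArg List.length hd
        simp at h
        omega
      have h0 : xs[i]? = some y := by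
        have h := congrArg (fun (l : List Int) => l[0]?) hd
        simpa [List.getElem?_drop] using h
      have hgi : xs.getD i 0 = y := by simp [List.getD_eq_getElem?_getD, h0]
      have h1 : xs[i+1]? = some y2 := by
        have h := congrArg (fun (l : List Int) => l[1]?) hd
        simpa [List.getElem?_drop] using h
      have hgi1 : xs.getD (i+1) 0 = y2 := by simp [List.getD_eq_getElem?_getD, h1]
      have ht2 : xs.drop (i+2) = t2 := by
        have h := congrArg (fun (l : List Int) => List.drop 2 l) hd
        simp only [List.drop_drop, List.drop_succ_cons, List.drop_zero] at h
        exact h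
      simp only [loopB]
      rw [loopS_two, if_neg (by omega : ¬ xs.length ≤ i), hgi, hgi1]
      split_ifs with hK h2
      · rfl
      · omega
      · -- the binary search on the sorted segment [i+2, length)
        have hp2 : t2.Pairwise (· ≤ ·) := by
          rw [hd] at hp
          exact ((List.pairwise_cons.1 ((List.pairwise_cons.1 hp).2)).2)
        have hseg : ∀ j, i+2 ≤ j → j < xs.length → xs.getD j 0 = t2.getD (j - (i+2)) 0 := by
          intro j hj1 hj2
          have h := congrArg (fun (l : List Int) => l[j - (i+2)]?) ht2
          simp only [List.getElem?_drop] at h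
          have he : i + 2 + (j - (i+2)) = j := by omega
          rw [he] at h
          simp [List.getD_eq_getElem?_getD, ← h]
        have hmono : ∀ p q, i+2 ≤ p → p ≤ q → q < xs.length →
            xs.getD p 0 ≤ xs.getD q 0 := by
          intro p q hp1 hpq hq
          rcases eq_or_lt_of_le hpq with rfl | hlt'
          · exact le_refl _
          · rw [hseg p (by omega) (by omega), hseg q (by omega) hq]
            have hrel := (List.pairwise_iff_getElem.1 hp2) (p - (i+2)) (q - (i+2))
              (by omega) (by omega) (by omega)
            have e1 : t2.getD (p - (i+2)) 0 = t2[p - (i+2)]'(by omega) :=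
              List.getD_eq_getElem t2 0 (by omega)
            have e2 : t2.getD (q - (i+2)) 0 = t2[q - (i+2)]'(by omega) :=
              List.getD_eq_getElem t2 0 (by omega)
            rw [e1, e2]; exact hrel
        obtain ⟨hb1, hb2, hb3, hb4⟩ := bisect_spec xs (y + 2 * y2)
          (xs.length - (i+2)) (i+2) xs.length (by omega) (by omega) (le_refl _) hmono
        set r := bisectLoop xs (y + 2 * y2) (i+2) xs.length with hr
        have hdropins : (xs.insertIdx r (y + 2 * y2)).drop (i+2)
            = t2.insertIdx (r - (i+2)) (y + 2 * y2) := by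
          rw [drop_insertIdx_of_le _ (i+2) xs r hb1 hb2, ht2]
        have hio : insertOrdered (y + 2 * y2) t2 = t2.insertIdx (r - (i+2)) (y + 2 * y2) := by
          apply insertOrdered_eq_insertIdx
          · omega
          · intro j hj
            have hx := hb3 (i+2+j) (by omega) (by omega)
            rw [hseg (i+2+j) (by omega) (by omega)] at hx
            have he : i + 2 + j - (i + 2) = j := by omega
            rw [he] at hx
            exact hx
          · intro j hj1 hj2
            have hx := hb4 (i+2+j) (by omega) (by omega)
            rw [hseg (i+2+j) (by omega) (by omega)] at hx
            have he : i + 2 + j - (i + 2) = j := by omega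
            rw [he] at hx
            exact hx
        rw [ih (xs.insertIdx r (y + 2 * y2)) (i+2) (cnt+1)
          (by rw [hdropins, ← hio]; exact insertOrdered_pairwise _ _ hp2)]
        rw [hdropins, ← hio]

-- ===== VERDICT (by name: the statement is the Claim_ definition above) =====
theorem solution_spec : Claim_equal_solution := by
  intro scoville K _
  unfold Spec_solution solution solution_alt
  rw [loopB_eq_loopS K (scoville.length + 1) (PySem.List.sorted scoville (fun x => x) false) 0 0
    (by simpa using PySem.List.sorted_pairwise (xs := scoville) (key := fun x => x))]
  simp only [List.drop_zero]
  exact loopA_eq_loopS K (scoville.length + 1) scoville _ 0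
    (PySem.List.sorted_perm ..) (by simpa using PySem.List.sorted_pairwise (xs := scoville) (key := fun x => x))
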